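-- pv_equiv track=rewrite | github.com/PerrinWaldock/teensy-pid | gui/analysis.py | findFirstNtrue
-- ===== SOURCE A (Python) =====
-- def findFirstNtrue(xs, n):
--     last = 0
--     for ind, val in enumerate(xs):
--         if val:
--             if (ind - last) > n:
--                 return last
--         else:
--             last = ind
-- ===== SOURCE B (Python) =====
-- def findFirstNtrue(xs, n):
--     # Run-based scan: jump over whole runs of equal truthiness instead of a
--     # per-element state machine.
--     N = len(xs)
--     i = 0
--     last = 0
--     while i < N:
--         v = bool(xs[i])
--         j = i + 1
--         while j < N and bool(xs[j]) == v:
--             j += 1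
--         if v:
--             if (j - 1) - last > n:
--                 return last
--         else:
--             last = j - 1
--         i = j
--     return None
-- ===== Notes on version B (the rewrite author's own statement) =====
-- stated objective: alternative
-- what changed: Replaced the per-element enumerate state machine by a run-based scan that jumps over whole runs of equal truthiness and tests each true run once by its end index.
import Mathlib
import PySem

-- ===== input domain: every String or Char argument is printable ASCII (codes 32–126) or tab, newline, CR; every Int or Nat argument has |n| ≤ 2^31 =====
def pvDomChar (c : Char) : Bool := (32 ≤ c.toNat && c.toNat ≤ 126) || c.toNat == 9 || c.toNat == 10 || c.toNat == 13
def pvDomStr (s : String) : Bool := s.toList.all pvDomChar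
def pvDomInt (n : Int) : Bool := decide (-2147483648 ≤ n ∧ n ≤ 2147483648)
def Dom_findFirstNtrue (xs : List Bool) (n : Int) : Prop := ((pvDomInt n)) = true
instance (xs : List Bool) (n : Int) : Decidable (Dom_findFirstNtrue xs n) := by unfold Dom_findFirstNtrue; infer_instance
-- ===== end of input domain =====

-- B replaces A's per-element state machine by a run-based scan over maximal runs of equal values (alternative decomposition; same cost).


-- ===== PORT A =====
-- A's loop: enumerate with state `last`, early return via Option.
def goA (n : Int) : List Bool → Int → Int → Option Int
  | [], _, _ => none
  | v :: rest, ind, last =>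
    if v then
      (if ind - last > n then some last else goA n rest (ind + 1) last)
    else goA n rest (ind + 1) ind

def findFirstNtrue (xs : List Bool) (n : Int) : Option Int := goA n xs 0 0

-- ===== PORT B =====
-- B's outer while loop over runs: each step consumes one maximal run of equal
-- values (the inner `while … == v` is the takeWhile/dropWhile split).
def goB (n : Int) : List Bool → Int → Int → Option Int
  | [], _, _ => none
  | v :: rest, idx, last =>
    let run := rest.takeWhile (· == v)
    let tail := rest.dropWhile (· == v)
    let j : Int := idx + 1 + run.length
    if v then
      (if j - 1 - last > n then some last else goB n tail j last)
    else goB n tail j (j - 1)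
termination_by xs => xs.length
decreasing_by
  all_goals simpa using Nat.lt_succ_of_le (List.length_dropWhile_le (p := (· == v)) (l := rest))

def findFirstNtrue_alt (xs : List Bool) (n : Int) : Option Int := goB n xs 0 0

-- ===== PRECONDITION & SPEC =====
def Spec_findFirstNtrue (xs : List Bool) (n : Int) (out : Option Int) : Prop := out = findFirstNtrue_alt xs n
instance (xs : List Bool) (n : Int) (out : Option Int) : Decidable (Spec_findFirstNtrue xs n out) := by unfold Spec_findFirstNtrue; infer_instance

-- ===== CLAIM (what is proved, stated in full; the proofs are below) =====
def Claim_equal_findFirstNtrue : Prop := ∀ (xs : List Bool) (n : Int), Dom_findFirstNtrue xs n → Spec_findFirstNtrue xs n (findFirstNtrue xs n)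

-- ===== LEMMAS AND PROOFS =====

-- A on a nonempty all-true block tests it element by element; the first hit (if any)
-- happens iff the block's last index is more than n past `last`, and returns `last`.
lemma goA_true_block (n : Int) (L : Nat) (rest : List Bool) (idx last : Int) (hL : 1 ≤ L) :
    goA n (List.replicate L true ++ rest) idx last =
      if idx + L - 1 - last > n then some last
      else goA n rest (idx + L) last := by
  induction L generalizing idx with
  | zero => omega
  | succ k ih =>
    by_cases hk : k = 0
    · subst hk
      simp only [List.replicate, List.cons_append, List.nil_append, goA, if_true]
      split_ifs with h1 h2 h2 <;> push_cast at * <;> first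
        | rfl
        | omega
        | (congr 1; omega)
    · have ih' := ih (idx + 1) (by omega)
      simp only [List.replicate, List.cons_append, goA, if_true, ih']
      split_ifs with h1 h2 h3 h3 <;> push_cast at * <;> first
        | rfl
        | omega
        | (congr 1; omega)

-- A on a nonempty all-false block just advances, setting `last` to the block's last index.
lemma goA_false_block (n : Int) (L : Nat) (rest : List Bool) (idx last : Int) (hL : 1 ≤ L) :
    goA n (List.replicate L false ++ rest) idx last =
      goA n rest (idx + L) (idx + L - 1) := by
  induction L generalizing idx last with
  | zero => omega
  | succ k ih =>
    by_cases hk : k = 0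
    · subst hk
      simp only [List.replicate, List.cons_append, List.nil_append, goA, if_false,
        Bool.false_eq_true]
      congr 1 <;> push_cast <;> ring
    · have ih' := ih (idx + 1) idx (by omega)
      simp only [List.replicate, List.cons_append, goA, if_false, Bool.false_eq_true, ih']
      congr 1 <;> push_cast <;> ring

lemma goB_eq_goA (n : Int) : ∀ (m : Nat) (xs : List Bool), xs.length ≤ m →
    ∀ (idx last : Int), goB n xs idx last = goA n xs idx last := by
  intro m
  induction m with
  | zero =>
    intro xs hlen idx last
    have : xs = [] := List.eq_nil_of_length_eq_zero (Nat.le_zero.mp hlen)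
    subst this
    simp [goB, goA]
  | succ m ih =>
    intro xs hlen idx last
    cases xs with
    | nil => simp [goB, goA]
    | cons v rest =>
      have hsplit : v :: rest = (v :: rest.takeWhile (· == v)) ++ rest.dropWhile (· == v) := by
        simp [List.takeWhile_append_dropWhile]
      have hall : ∀ b ∈ v :: rest.takeWhile (· == v), b = v := by
        intro b hb
        rcases List.mem_cons.mp hb with h | h
        · exact h
        · simpa using List.mem_takeWhile_imp h
      have hrep : v :: rest.takeWhile (· == v) =
          List.replicate (rest.takeWhile (· == v)).length.succ v := by
        have := List.eq_replicate_of_mem hall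
        simpa using this
      have htail : (rest.dropWhile (· == v)).length ≤ m := by
        have h1 := List.length_dropWhile_le (p := (· == v)) (l := rest)
        simp only [List.length_cons] at hlen; omega
      have ihtail := ih (rest.dropWhile (· == v)) htail
      cases v with
      | true =>
        conv_rhs => rw [hsplit, hrep]
        rw [goA_true_block n _ _ idx last (Nat.succ_le_succ (Nat.zero_le _))]
        simp only [goB, if_true]
        rw [ihtail]
        simp only [Nat.succ_eq_add_one]
        split_ifs with h1 h2 h2 <;> push_cast at * <;> first
          | rfl
          | omega
          | (congr 1; omega)
      | false =>
        conv_rhs => rw [hsplit, hrep]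
        rw [goA_false_block n _ _ idx last (Nat.succ_le_succ (Nat.zero_le _))]
        simp only [goB, if_false, Bool.false_eq_true]
        rw [ihtail]
        simp only [Nat.succ_eq_add_one]
        congr 1 <;> push_cast <;> ring

-- ===== VERDICT (by name: the statement is the Claim_ definition above) =====
theorem findFirstNtrue_spec : Claim_equal_findFirstNtrue := by
  intro xs n _
  unfold Spec_findFirstNtrue findFirstNtrue findFirstNtrue_alt
  exact (goB_eq_goA n xs.length xs le_rfl 0 0).symm
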